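-- pv_equiv track=rewrite | github.com/geowang/urbanfootprint | footprint/scagspm2_client/configuration/default/config_entity/default_project.py | project_key
-- ===== SOURCE A (Python) =====
-- def project_key(name):
--
--     if len(name) < 7:
--         return name.lower().replace(' ', '_')
--
--     key_parts = []
--     previous = None
--
--     for l in name.lower():
--         if l not in ['a', 'e', 'i', 'o', 'u', ' '] and previous != l:
--             key_parts.append(l)
--             previous = l
--
--     return ''.join(key_parts)
-- ===== SOURCE B (Python) =====
-- def project_key(name):
--     if len(name) < 7:
--         return name.lower().replace(' ', '_')
--     # pass 1: filter out vowels and spaces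
--     filtered = [c for c in name.lower() if c not in 'aeiou ']
--     # pass 2: collapse each run of equal characters to its first element
--     out = []
--     i = 0
--     n = len(filtered)
--     while i < n:
--         out.append(filtered[i])
--         j = i + 1
--         while j < n and filtered[j] == filtered[i]:
--             j += 1
--         i = j
--     return ''.join(out)
-- ===== Notes on version B (the rewrite author's own statement) =====
-- stated objective: alternative
-- what changed: A fuses filtering and deduplication in one loop carrying a last-emitted-character state variable; B first filters vowels/spaces in a comprehension and then collapses runs of equal characters in a separate run-skipping pass over the filtered list.
import Mathlib
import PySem

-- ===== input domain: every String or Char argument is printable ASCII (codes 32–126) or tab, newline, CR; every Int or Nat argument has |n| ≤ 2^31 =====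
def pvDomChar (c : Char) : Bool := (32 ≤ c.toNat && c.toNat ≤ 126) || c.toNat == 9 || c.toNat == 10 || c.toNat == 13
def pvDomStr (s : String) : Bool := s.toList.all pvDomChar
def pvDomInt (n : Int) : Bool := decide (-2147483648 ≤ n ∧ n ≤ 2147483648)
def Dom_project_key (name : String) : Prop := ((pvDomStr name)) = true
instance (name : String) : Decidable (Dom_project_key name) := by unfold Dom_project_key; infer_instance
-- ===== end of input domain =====

-- B filters vowels/spaces first and then collapses runs in a second pass, instead of A's
-- single loop with a last-emitted-character state; same result, similar cost (alternative).

-- ===== PORT A =====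
-- one loop: append l when it is not a vowel/space and differs from the last appended char
def project_key (name : String) : String :=
  if PySem.Str.len name < 7 then
    PySem.Str.replace (PySem.Str.lower name) " " "_"
  else
    let st := (PySem.Str.lower name).toList.foldl
      (fun (st : List Char × Option Char) l =>
        if l ∉ ['a', 'e', 'i', 'o', 'u', ' '] ∧ st.2 ≠ some l then (st.1 ++ [l], some l) else st)
      ([], none)
    String.ofList st.1

-- ===== PORT B =====
-- Source B's filter test: c not in 'aeiou '
def pvKeep (c : Char) : Bool := c ∉ ['a', 'e', 'i', 'o', 'u', ' ']

-- pass 2 of Source B: emit the head of each run, then skip the rest of the run (the inner while)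
def pvCollapse : List Char → List Char
  | [] => []
  | c :: rest => c :: pvCollapse (rest.dropWhile (· == c))
termination_by l => l.length
decreasing_by simpa using Nat.lt_succ_of_le (List.length_dropWhile_le _ _)

def project_key_alt (name : String) : String :=
  if PySem.Str.len name < 7 then
    PySem.Str.replace (PySem.Str.lower name) " " "_"
  else
    let filtered := (PySem.Str.lower name).toList.filter pvKeep
    String.ofList (pvCollapse filtered)

-- ===== PRECONDITION & SPEC =====
def Spec_project_key (name : String) (out : String) : Prop := out = project_key_alt name
instance (name : String) (out : String) : Decidable (Spec_project_key name out) := by unfold Spec_project_key; infer_instance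

-- ===== CLAIM (what is proved, stated in full; the proofs are below) =====
def Claim_equal_project_key : Prop := ∀ (name : String), Dom_project_key name → Spec_project_key name (project_key name)

-- ===== LEMMAS AND PROOFS =====

-- pvAux prev l : what A's loop appends when scanning the already-filtered list l with state prev
def pvAux : Option Char → List Char → List Char
  | _, [] => []
  | prev, c :: rest => if prev = some c then pvAux prev rest else c :: pvAux (some c) rest

theorem pvFoldl_eq_aux_filter (l : List Char) (acc : List Char) (prev : Option Char) :
    (l.foldl
      (fun (st : List Char × Option Char) c =>
        if c ∉ ['a', 'e', 'i', 'o', 'u', ' '] ∧ st.2 ≠ some c then (st.1 ++ [c], some c) else st)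
      (acc, prev)).1
    = acc ++ pvAux prev (l.filter pvKeep) := by
  induction l generalizing acc prev with
  | nil => simp [pvAux]
  | cons c rest ih =>
    rw [List.foldl_cons, List.filter_cons]
    dsimp only
    by_cases hk : pvKeep c = true
    · have hnm : c ∉ ['a', 'e', 'i', 'o', 'u', ' '] := by simpa [pvKeep] using hk
      rw [if_pos hk]
      by_cases hp : prev = some c
      · rw [if_neg (fun hco => hco.2 hp)]
        simp only [pvAux, if_pos hp]
        exact ih acc prev
      · rw [if_pos ⟨hnm, hp⟩]
        simp only [pvAux, if_neg hp]
        rw [ih (acc ++ [c]) (some c), List.append_assoc]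
        rfl
    · have hm : c ∈ ['a', 'e', 'i', 'o', 'u', ' '] := by
        by_contra hn; exact hk (by simpa [pvKeep] using hn)
      rw [if_neg hk, if_neg (fun hco => hco.1 hm)]
      exact ih acc prev

theorem pvAux_some (l : List Char) (a : Char) :
    pvAux (some a) l = pvCollapse (l.dropWhile (· == a)) := by
  induction l generalizing a with
  | nil => simp [pvAux, pvCollapse]
  | cons c rest ih =>
    by_cases h : a = c
    · subst h
      simp [pvAux, ih]
    · have hc : (c == a) = false := by simp; exact fun hh => h hh.symm
      simp [pvAux, h, hc, pvCollapse, ih]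

theorem pvAux_none (l : List Char) : pvAux none l = pvCollapse l := by
  cases l with
  | nil => simp [pvAux, pvCollapse]
  | cons c rest => simp [pvAux, pvCollapse, pvAux_some]

-- ===== VERDICT (by name: the statement is the Claim_ definition above) =====
theorem project_key_spec : Claim_equal_project_key := by
  intro name _
  unfold Spec_project_key project_key project_key_alt
  split_ifs with h
  · rfl
  · simp only [pvFoldl_eq_aux_filter, List.nil_append, pvAux_none]
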